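-- pv_equiv track=rewrite | github.com/daveisagit/advent-of-code | src/common/grid_2d.py | window_join
-- ===== SOURCE A (Python) =====
-- def window_join(windows):
--     """Join a grid of windows where ever window is a grid
--     of the same size"""
--     grid = []
--     for window_row in windows:
--         row_slice = []
--         for window_data in window_row:
--             for idx, row in enumerate(window_data):
--                 if idx >= len(row_slice):
--                     row_slice.append([])
--                 row_slice[idx].extend(row)
--         grid.extend(row_slice)
--     return grid
-- ===== SOURCE B (Python) =====
-- def window_join(windows):
--     """Join a grid of windows where ever window is a grid
--     of the same size"""
--     grid = []
--     for window_row in windows: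
--         height = max((len(w) for w in window_row), default=0)
--         for idx in range(height):
--             grid.append([x for w in window_row if idx < len(w) for x in w[idx]])
--     return grid
-- ===== Notes on version B (the rewrite author's own statement) =====
-- stated objective: idiomatic
-- what changed: Instead of incrementally growing a positional row_slice accumulator and extending its entries in place, B computes the band height up front and builds each joined output row directly as one flattening comprehension over the windows of the band.
import Mathlib
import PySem

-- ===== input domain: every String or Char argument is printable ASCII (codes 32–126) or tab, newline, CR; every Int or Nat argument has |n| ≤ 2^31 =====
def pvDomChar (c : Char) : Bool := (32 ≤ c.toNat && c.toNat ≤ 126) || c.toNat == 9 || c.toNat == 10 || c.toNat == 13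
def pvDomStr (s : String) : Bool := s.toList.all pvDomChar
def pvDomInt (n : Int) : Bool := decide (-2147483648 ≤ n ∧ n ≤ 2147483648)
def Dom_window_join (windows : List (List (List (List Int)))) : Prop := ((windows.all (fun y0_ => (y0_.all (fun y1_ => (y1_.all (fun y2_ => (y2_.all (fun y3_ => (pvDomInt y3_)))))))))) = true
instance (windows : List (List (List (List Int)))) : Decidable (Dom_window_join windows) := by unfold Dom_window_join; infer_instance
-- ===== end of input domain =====

-- B replaces A's incrementally grown positional row_slice accumulator by computing the band
-- height up front and building each joined output row directly (objective: idiomatic).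

-- ===== PORT A =====
-- body of A's innermost loop: 'if idx >= len(row_slice): row_slice.append([])' then 'row_slice[idx].extend(row)'
def pvStep (rs : List (List Int)) (p : Int × List Int) : List (List Int) :=
  let rs := if (rs.length : Int) ≤ p.1 then rs ++ [[]] else rs
  PySem.List.pySetD rs p.1 (PySem.List.pyGetD rs p.1 [] ++ p.2)

def window_join (windows : List (List (List (List Int)))) : List (List Int) :=
  windows.foldl (fun grid window_row =>
    grid ++ window_row.foldl (fun row_slice window_data =>
      (PySem.List.enumerate window_data 0).foldl pvStep row_slice) []) []

-- ===== PORT B =====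
def window_join_alt (windows : List (List (List (List Int)))) : List (List Int) :=
  windows.foldl (fun grid window_row =>
    let height := window_row.foldl (fun m w => max m w.length) 0
    grid ++ (List.range height).map (fun idx =>
      (window_row.filter (fun w => idx < w.length)).flatMap (fun w => w.getD idx []))) []

-- ===== PRECONDITION & SPEC =====
def Spec_window_join (windows : List (List (List (List Int)))) (out : List (List Int)) : Prop := out = window_join_alt windows
instance (windows : List (List (List (List Int)))) (out : List (List Int)) : Decidable (Spec_window_join windows out) := by unfold Spec_window_join; infer_instance

-- ===== CLAIM (what is proved, stated in full; the proofs are below) =====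
def Claim_equal_window_join : Prop := ∀ (windows : List (List (List (List Int)))), Dom_window_join windows → Spec_window_join windows (window_join windows)

-- ===== LEMMAS AND PROOFS =====

-- the joined row at index i of a band: concatenation of row i of every window of the band
def pvRowF (wr : List (List (List Int))) (i : Nat) : List Int :=
  wr.flatMap (fun w => w.getD i [])

-- the band height as B computes it
def pvH (wr : List (List (List Int))) : Nat :=
  wr.foldl (fun m w => max m w.length) 0

theorem pv_map_getD_range {α : Type} (l : List α) (d : α) :
    (List.range l.length).map (fun i => l.getD i d) = l := by
  apply List.ext_getElem
  · simp
  · intro i h1 h2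
    simp [List.getD_eq_getElem?_getD, List.getElem?_eq_getElem h2]

theorem pvStep_len (rs : List (List Int)) (r : List Int) (k : Nat) (hk : k ≤ rs.length) :
    (pvStep rs ((k : Int), r)).length = max rs.length (k + 1) := by
  unfold pvStep
  simp only [Nat.cast_le]
  by_cases h : rs.length ≤ k
  · rw [if_pos h, PySem.List.pySetD_natCast]
    simp
    omega
  · rw [if_neg h, PySem.List.pySetD_natCast]
    simp
    omega

theorem pvStep_getD (rs : List (List Int)) (r : List Int) (k : Nat) (hk : k ≤ rs.length)
    (i : Nat) :
    (pvStep rs ((k : Int), r)).getD i [] =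
      if i = k then rs.getD k [] ++ r else rs.getD i [] := by
  unfold pvStep
  simp only [Nat.cast_le]
  by_cases h : rs.length ≤ k
  · have hek : k = rs.length := le_antisymm hk h
    subst hek
    rw [if_pos h, PySem.List.pyGetD_natCast, PySem.List.pySetD_natCast]
    have hg : (rs ++ [([] : List Int)]).getD rs.length [] = [] := by
      rw [List.getD_eq_getElem?_getD, List.getElem?_append_right (le_refl _)]
      simp
    rw [hg]
    rw [List.getD_eq_getElem?_getD, List.getElem?_set]
    by_cases hik : i = rs.length
    · rw [if_pos hik.symm, if_pos (by simp), if_pos hik]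
      have : rs.getD rs.length ([] : List Int) = [] := by
        rw [List.getD_eq_getElem?_getD]
        have : rs[rs.length]? = none := by rw [List.getElem?_eq_none_iff]
        rw [this]
        rfl
      rw [this]
      rfl
    · rw [if_neg (fun hh => hik hh.symm), if_neg hik]
      by_cases hlt : i < rs.length
      · rw [List.getElem?_append_left hlt, ← List.getD_eq_getElem?_getD]
      · have h2 : (rs ++ [([] : List Int)])[i]? = none := by
          rw [List.getElem?_eq_none_iff]; simp; omega
        have h1 : rs[i]? = none := by rw [List.getElem?_eq_none_iff]; omega
        rw [h2, List.getD_eq_getElem?_getD, h1]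
  · have hklt : k < rs.length := by omega
    rw [if_neg h, PySem.List.pyGetD_natCast, PySem.List.pySetD_natCast]
    rw [List.getD_eq_getElem?_getD, List.getElem?_set]
    by_cases hik : i = k
    · rw [if_pos hik.symm, if_pos hklt, if_pos hik]
      rfl
    · rw [if_neg (fun hh => hik hh.symm), if_neg hik, ← List.getD_eq_getElem?_getD]

theorem pv_innerA (w : List (List Int)) :
    ∀ (k : Nat) (rs : List (List Int)), k ≤ rs.length →
    (PySem.List.enumerate w (k : Int)).foldl pvStep rs =
      (List.range (max rs.length (k + w.length))).map
        (fun i => rs.getD i [] ++ if k ≤ i then w.getD (i - k) [] else []) := by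
  induction w with
  | nil =>
    intro k rs hk
    rw [PySem.List.enumerate_nil, List.foldl_nil, List.length_nil,
      show max rs.length (k + 0) = rs.length from by omega]
    have h1 : (List.range rs.length).map
        (fun i => rs.getD i [] ++ if k ≤ i then ([] : List (List Int)).getD (i - k) [] else []) =
        (List.range rs.length).map (fun i => rs.getD i []) := by
      apply List.map_congr_left
      intro i _
      split <;> simp
    rw [h1, pv_map_getD_range]
  | cons r ws ih =>
    intro k rs hk
    have hcast : (k : Int) + 1 = ((k + 1 : Nat) : Int) := by push_cast; ring
    rw [PySem.List.enumerate_cons, List.foldl_cons, hcast]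
    have hk2 : k + 1 ≤ (pvStep rs ((k : Int), r)).length := by
      rw [pvStep_len rs r k hk]; omega
    rw [ih (k + 1) _ hk2]
    rw [pvStep_len rs r k hk]
    have hrange : max (max rs.length (k + 1)) (k + 1 + ws.length)
        = max rs.length (k + (ws.length + 1)) := by omega
    rw [hrange]
    apply List.map_congr_left
    intro i hi
    rw [pvStep_getD rs r k hk i]
    by_cases hik : i = k
    · subst hik
      simp
    · by_cases hle : k ≤ i
      · have hle1 : k + 1 ≤ i := by omega
        have hsub : i - k = (i - (k + 1)) + 1 := by omega
        simp [hik, hle, hle1, hsub]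
      · have hle2 : ¬ (k + 1 ≤ i) := by omega
        simp [hik, hle, hle2]

theorem pvRowF_eq_nil (wr : List (List (List Int))) (i : Nat) (hi : pvH wr ≤ i) :
    pvRowF wr i = [] := by
  unfold pvRowF
  rw [List.flatMap_eq_nil_iff]
  intro w hw
  have hle : w.length ≤ pvH wr := (PySem.List.le_foldl_max_nat wr List.length 0).2 w hw
  rw [List.getD_eq_getElem?_getD]
  have : w[i]? = none := by rw [List.getElem?_eq_none_iff]; omega
  simp [this]

theorem pv_band (wr : List (List (List Int))) :
    wr.foldl (fun row_slice window_data =>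
      (PySem.List.enumerate window_data 0).foldl pvStep row_slice) [] =
    (List.range (pvH wr)).map (pvRowF wr) := by
  induction wr using List.reverseRecOn with
  | nil => simp [pvH]
  | append_singleton wr w ih =>
    rw [List.foldl_append, List.foldl_cons, List.foldl_nil, ih]
    have h0 : ((0 : Nat) : Int) = (0 : Int) := rfl
    rw [← h0, pv_innerA w 0 _ (by omega)]
    have hlen : ((List.range (pvH wr)).map (pvRowF wr)).length = pvH wr := by simp
    rw [hlen]
    have hH : pvH (wr ++ [w]) = max (pvH wr) w.length := by
      unfold pvH; rw [List.foldl_append]; rfl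
    rw [hH, show (0 + w.length) = w.length from by omega]
    apply List.map_congr_left
    intro i hi
    rw [Nat.sub_zero, if_pos (Nat.zero_le i)]
    have hgetD : ((List.range (pvH wr)).map (pvRowF wr)).getD i [] = pvRowF wr i := by
      by_cases hlt : i < pvH wr
      · rw [List.getD_eq_getElem?_getD, List.getElem?_map, List.getElem?_range hlt]
        rfl
      · have h1 : ((List.range (pvH wr)).map (pvRowF wr))[i]? = none := by
          rw [List.getElem?_eq_none_iff]; simp; omega
        rw [List.getD_eq_getElem?_getD, h1, pvRowF_eq_nil wr i (by omega)]
        rfl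
    rw [hgetD]
    simp [pvRowF]

theorem pv_filter_flatMap (wr : List (List (List Int))) (i : Nat) :
    (wr.filter (fun w => i < w.length)).flatMap (fun w => w.getD i []) = pvRowF wr i := by
  unfold pvRowF
  induction wr with
  | nil => rfl
  | cons w ws ih =>
    by_cases h : i < w.length
    · have hd : decide (i < w.length) = true := by simp [h]
      rw [List.filter_cons, hd, if_pos rfl, List.flatMap_cons, List.flatMap_cons, ih]
    · have hd : decide (i < w.length) = false := by simp [h]
      have hz : w.getD i ([] : List Int) = [] := by
        rw [List.getD_eq_getElem?_getD]
        have hn : w[i]? = none := by rw [List.getElem?_eq_none_iff]; omega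
        rw [hn]
        rfl
      rw [List.filter_cons, hd, if_neg Bool.false_ne_true, ih, List.flatMap_cons, hz,
        List.nil_append]

theorem pv_bands_eq (wr : List (List (List Int))) :
    wr.foldl (fun row_slice window_data =>
      (PySem.List.enumerate window_data 0).foldl pvStep row_slice) [] =
    (List.range (wr.foldl (fun m w => max m w.length) 0)).map (fun idx =>
      (wr.filter (fun w => idx < w.length)).flatMap (fun w => w.getD idx [])) := by
  rw [pv_band]
  apply List.map_congr_left
  intro i _
  rw [pv_filter_flatMap]

theorem pv_outer (ws : List (List (List (List Int)))) (g : List (List Int)) :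
    ws.foldl (fun grid window_row =>
      grid ++ window_row.foldl (fun row_slice window_data =>
        (PySem.List.enumerate window_data 0).foldl pvStep row_slice) []) g =
    ws.foldl (fun grid window_row =>
      let height := window_row.foldl (fun m w => max m w.length) 0
      grid ++ (List.range height).map (fun idx =>
        (window_row.filter (fun w => idx < w.length)).flatMap (fun w => w.getD idx []))) g := by
  induction ws generalizing g with
  | nil => rfl
  | cons wr t ih =>
    simp only [List.foldl_cons]
    rw [pv_bands_eq]
    exact ih _

-- ===== VERDICT (by name: the statement is the Claim_ definition above) =====
theorem window_join_spec : Claim_equal_window_join := by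
  intro windows _
  unfold Spec_window_join window_join window_join_alt
  exact pv_outer windows []
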